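-- pv_equiv track=rewrite | github.com/protus75/lakehouse | dlt/lib/tabletop_cleanup.py | _split_preserving_tables
-- ===== SOURCE A (Python) =====
-- def _split_preserving_tables(content: str) -> list[str]:
--     """Split content into paragraph blocks, keeping table rows together.
--
--     Tables (contiguous lines starting with '|') are kept as single blocks
--     even if separated by blank lines within the table structure."""
--     raw_blocks = content.split("\n\n")
--     merged = []
--     i = 0
--     while i < len(raw_blocks):
--         block = raw_blocks[i]
--         # If this block contains table rows, merge with adjacent table blocks
--         if any(line.strip().startswith("|") for line in block.split("\n") if line.strip()):
--             while i + 1 < len(raw_blocks):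
--                 next_block = raw_blocks[i + 1]
--                 next_lines = [l.strip() for l in next_block.split("\n") if l.strip()]
--                 if next_lines and next_lines[0].startswith("|"):
--                     block = block + "\n\n" + next_block
--                     i += 1
--                 else:
--                     break
--         merged.append(block)
--         i += 1
--     return merged
-- ===== SOURCE B (Python) =====
-- def _split_preserving_tables(content: str) -> list[str]:
--     """Split content into paragraph blocks, keeping table rows together.
--
--     One flat pass: keep the current group in `cur` and a flag saying whether
--     the group's starting block contained any table row; a block whose first
--     non-blank line starts with '|' is appended to such a group, otherwise it
--     starts a new group."""
--     result = []
--     cur = None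
--     group_is_table = False
--     for block in content.split("\n\n"):
--         lines = [l.strip() for l in block.split("\n") if l.strip()]
--         if cur is not None and group_is_table and lines and lines[0].startswith("|"):
--             cur = cur + "\n\n" + block
--         else:
--             if cur is not None:
--                 result.append(cur)
--             cur = block
--             group_is_table = any(l.startswith("|") for l in lines)
--     if cur is not None:
--         result.append(cur)
--     return result
-- ===== Notes on version B (the rewrite author's own statement) =====
-- stated objective: simpler
-- what changed: Replaces A's index-driven while loop with a nested inner merging while by one flat for-pass that keeps the current group and a boolean table flag, flushing finished groups as it goes.
import Mathlib
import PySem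

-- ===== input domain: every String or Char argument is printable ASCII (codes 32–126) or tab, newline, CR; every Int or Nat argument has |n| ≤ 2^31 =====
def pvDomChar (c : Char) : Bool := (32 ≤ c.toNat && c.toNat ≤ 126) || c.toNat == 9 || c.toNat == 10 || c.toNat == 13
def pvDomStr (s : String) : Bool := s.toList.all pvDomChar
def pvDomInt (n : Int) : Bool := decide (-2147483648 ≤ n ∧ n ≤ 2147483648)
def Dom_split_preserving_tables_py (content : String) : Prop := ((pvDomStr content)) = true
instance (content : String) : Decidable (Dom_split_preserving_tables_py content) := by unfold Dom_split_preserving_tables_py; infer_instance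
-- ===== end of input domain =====

-- B replaces A's index-driven while loop with a nested inner merging while by one
-- flat pass keeping the current group and a table flag (objective: simpler).

-- ===== PORT A =====
-- "[l.strip() for l in block.split('\n') if l.strip()]"  (split? is some: sep ≠ "")
def pvNextLines (block : String) : List String :=
  ((PySem.Str.split? block "\n").getD []).filterMap (fun l =>
    let s := PySem.Str.strip l
    if s = "" then none else some s)

-- "any(line.strip().startswith('|') for line in block.split('\n') if line.strip())"
def pvAnyTable (block : String) : Bool :=
  ((PySem.Str.split? block "\n").getD []).any (fun line =>
    let s := PySem.Str.strip line
    if s = "" then false else PySem.Str.startswith s "|")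

-- "next_lines and next_lines[0].startswith('|')"
def pvFirstTable (block : String) : Bool :=
  match pvNextLines block with
  | [] => false
  | hd :: _ => PySem.Str.startswith hd "|"

-- A's inner while: absorb following blocks while their first stripped line starts with '|'
def pvAbsorb : String → List String → String × List String
  | b, [] => (b, [])
  | b, n :: rest =>
    if pvFirstTable n then pvAbsorb (b ++ "\n\n" ++ n) rest else (b, n :: rest)

theorem pvAbsorb_len (b : String) (rest : List String) :
    (pvAbsorb b rest).2.length ≤ rest.length := by
  induction rest generalizing b with
  | nil => simp [pvAbsorb]
  | cons n rest ih =>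
    simp only [pvAbsorb]
    split
    · exact le_trans (ih _) (Nat.le_succ _)
    · simp

-- A's outer while over raw_blocks
def pvMergeA : List String → List String
  | [] => []
  | b :: rest =>
    if pvAnyTable b then
      (pvAbsorb b rest).1 :: pvMergeA (pvAbsorb b rest).2
    else
      b :: pvMergeA rest
termination_by bs => bs.length
decreasing_by
  · exact Nat.lt_succ_of_le (pvAbsorb_len b rest)
  · simp

def split_preserving_tables_py (content : String) : List String :=
  pvMergeA ((PySem.Str.split? content "\n\n").getD [])

-- ===== PORT B =====
-- "any(l.startswith('|') for l in lines)"  (lines already stripped, non-blank)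
def pvLinesAny (block : String) : Bool :=
  (pvNextLines block).any (fun l => PySem.Str.startswith l "|")

-- the body of B's for-loop; state = (result, cur, group_is_table)
def pvStepB (st : List String × Option String × Bool) (block : String) :
    List String × Option String × Bool :=
  let lines := pvNextLines block
  let cont : Bool := match lines with
    | [] => false
    | hd :: _ => PySem.Str.startswith hd "|"
  match st with
  | (res, some c, flag) =>
    if flag && cont then (res, some (c ++ "\n\n" ++ block), flag)
    else (res ++ [c], some block, pvLinesAny block)
  | (res, none, _) => (res, some block, pvLinesAny block)

-- B's final "if cur is not None: result.append(cur)"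
def pvFlush (st : List String × Option String × Bool) : List String :=
  match st.2.1 with
  | some c => st.1 ++ [c]
  | none => st.1

def split_preserving_tables_py_alt (content : String) : List String :=
  pvFlush (((PySem.Str.split? content "\n\n").getD []).foldl pvStepB ([], none, false))

-- ===== PRECONDITION & SPEC =====
def Spec_split_preserving_tables_py (content : String) (out : List String) : Prop := out = split_preserving_tables_py_alt content
instance (content : String) (out : List String) : Decidable (Spec_split_preserving_tables_py content out) := by unfold Spec_split_preserving_tables_py; infer_instance

-- ===== CLAIM (what is proved, stated in full; the proofs are below) =====
def Claim_equal_split_preserving_tables_py : Prop := ∀ (content : String), Dom_split_preserving_tables_py content → Spec_split_preserving_tables_py content (split_preserving_tables_py content)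

-- ===== LEMMAS AND PROOFS =====

-- B's 'any' over the stripped non-blank lines equals A's filtered generator 'any'
theorem pvLinesAny_eq (b : String) : pvLinesAny b = pvAnyTable b := by
  unfold pvLinesAny pvAnyTable pvNextLines
  induction (PySem.Str.split? b "\n").getD [] with
  | nil => rfl
  | cons l ls ih =>
    simp only [List.filterMap_cons, List.any_cons]
    simp at ih
    by_cases h : PySem.Str.strip l = "" <;> simp [h, ih]

theorem pvStepB_fresh (res : List String) (c : String) (n : String) :
    pvStepB (res, some c, false) n = (res ++ [c], some n, pvAnyTable n) := by
  simp [pvStepB, pvLinesAny_eq]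

-- the loop invariant: B's fold from a live group (cur = some c) produces exactly
-- what A produces — the group closed when the flag is off, absorbing when on
theorem pvMain (bs : List String) : ∀ (res : List String) (c : String),
    pvFlush (bs.foldl pvStepB (res, some c, false)) = res ++ c :: pvMergeA bs
    ∧ pvFlush (bs.foldl pvStepB (res, some c, true)) =
        res ++ (pvAbsorb c bs).1 :: pvMergeA (pvAbsorb c bs).2 := by
  induction bs with
  | nil => intro res c; simp [pvFlush, pvAbsorb, pvMergeA]
  | cons n rest ih =>
    intro res c
    constructor
    · -- flag off: c is flushed, n starts a new group
      show pvFlush (rest.foldl pvStepB (pvStepB (res, some c, false) n)) = _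
      rw [pvStepB_fresh, pvMergeA]
      cases h : pvAnyTable n with
      | true => rw [(ih (res ++ [c]) n).2]; simp
      | false => rw [(ih (res ++ [c]) n).1]; simp
    · -- flag on: n joins the group iff its first stripped line starts with '|'
      show pvFlush (rest.foldl pvStepB (pvStepB (res, some c, true) n)) = _
      cases hft : pvFirstTable n with
      | true =>
        have hstep : pvStepB (res, some c, true) n = (res, some (c ++ "\n\n" ++ n), true) := by
          unfold pvStepB
          unfold pvFirstTable at hft
          rcases hl : pvNextLines n with _ | ⟨hd, tl⟩ <;> rw [hl] at hft
          · exact absurd hft (by simp)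
          · simp at hft
            simp [hft]
        rw [hstep, (ih res (c ++ "\n\n" ++ n)).2, pvAbsorb, hft]
        simp
      | false =>
        have hstep : pvStepB (res, some c, true) n = (res ++ [c], some n, pvAnyTable n) := by
          unfold pvStepB
          unfold pvFirstTable at hft
          rcases hl : pvNextLines n with _ | ⟨hd, tl⟩ <;> rw [hl] at hft
          · simp [pvLinesAny_eq]
          · simp at hft
            simp [hft, pvLinesAny_eq]
        rw [hstep, pvAbsorb, hft]
        simp only [Bool.false_eq_true, if_false]
        rw [pvMergeA]
        cases h : pvAnyTable n with
        | true => rw [(ih (res ++ [c]) n).2]; simp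
        | false => rw [(ih (res ++ [c]) n).1]; simp

-- ===== VERDICT (by name: the statement is the Claim_ definition above) =====
theorem split_preserving_tables_py_spec : Claim_equal_split_preserving_tables_py := by
  intro content _
  show split_preserving_tables_py content = split_preserving_tables_py_alt content
  unfold split_preserving_tables_py split_preserving_tables_py_alt
  cases hbs : (PySem.Str.split? content "\n\n").getD [] with
  | nil => simp [pvMergeA, pvFlush]
  | cons b rest =>
    have hstep : pvStepB (([], none, false) : List String × Option String × Bool) b
        = ([], some b, pvAnyTable b) := by
      simp [pvStepB, pvLinesAny_eq]
    rw [List.foldl_cons, hstep, pvMergeA]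
    cases h : pvAnyTable b with
    | true => rw [(pvMain rest [] b).2]; simp
    | false => rw [(pvMain rest [] b).1]; simp
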